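-- pv_equiv track=rewrite | github.com/naides14/IKMproject_suh | logic.py | datesort2
-- ===== SOURCE A (Python) =====
-- def datesort2(stimes,specbase,finsort): #сопоставление дат из списка дат с датами из основного списка и сортировка
--     for i in range(len(stimes)):
--         for j in range(len(specbase)):
--             if stimes[i]==specbase[j][0]:
--                 finsort.append(specbase[j])
--                 specbase.pop(j)
--                 break
--     return finsort
-- ===== SOURCE B (Python) =====
-- def datesort2(stimes, specbase, finsort):
--     # Alternative strategy: one pass indexing specbase by date (FIFO per date), one pass over stimes.
--     # Return-value equivalent to A; like A it appends matches to finsort, but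
--     # it does not remove matched rows from specbase (A pops them in place).
--     queues = {}
--     for row in specbase:
--         queues.setdefault(row[0], []).append(row)
--     heads = {}
--     matched = []
--     for s in stimes:
--         q = queues.get(s, [])
--         i = heads.get(s, 0)
--         if i < len(q):
--             matched.append(q[i])
--             heads[s] = i + 1
--     finsort.extend(matched)
--     return finsort
-- ===== Notes on version B (the rewrite author's own statement) =====
-- stated objective: alternative
-- what changed: Replaces the nested rescan of specbase (with in-place pop) by a single grouping pass building a date->FIFO-queue dict plus per-date head counters, so each stime is matched by one dict lookup instead of a scan of specbase.
-- outside the precondition, e.g. on datesort2(['a'], [['a'], []], []): A returns [['a']], B raises IndexError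
import Mathlib
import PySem

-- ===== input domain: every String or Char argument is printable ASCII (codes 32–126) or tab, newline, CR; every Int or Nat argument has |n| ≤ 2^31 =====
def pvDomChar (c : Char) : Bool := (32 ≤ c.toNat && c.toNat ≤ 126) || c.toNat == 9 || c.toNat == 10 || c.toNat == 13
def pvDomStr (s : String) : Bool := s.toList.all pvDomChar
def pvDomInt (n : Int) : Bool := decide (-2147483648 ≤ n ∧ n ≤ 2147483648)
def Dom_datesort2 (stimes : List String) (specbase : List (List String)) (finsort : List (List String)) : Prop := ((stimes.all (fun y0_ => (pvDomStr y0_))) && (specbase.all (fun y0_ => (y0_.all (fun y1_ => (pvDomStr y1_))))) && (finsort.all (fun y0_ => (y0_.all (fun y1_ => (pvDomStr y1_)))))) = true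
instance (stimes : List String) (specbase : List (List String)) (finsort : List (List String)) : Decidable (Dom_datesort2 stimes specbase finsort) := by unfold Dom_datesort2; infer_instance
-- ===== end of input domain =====

-- B replaces A's per-stime rescan of specbase by a date→FIFO-queue dict built once (objective: alternative single-pass indexing).
-- A mutates its arguments (pops matched rows from specbase, appends to finsort); the equivalence proved is about the RETURN value only.

-- row[0] as used by both ports (Pre_ guarantees rows are nonempty, so the "" default is never taken)
def pvKey (r : List String) : String := (PySem.List.pyGet? r 0).getD ""

-- ===== PORT A =====
-- inner `for j in range(len(specbase)) … break`: scan for the first row with row[0]==s, remove it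
def aStep (s : String) : List (List String) → List (List String) × Option (List String)
  | [] => ([], none)
  | r :: rest =>
      if s == pvKey r then (rest, some r)
      else
        let p := aStep s rest
        (r :: p.1, p.2)

-- outer `for i in range(len(stimes))`, appending the match (if any) to finsort
def aLoop : List String → List (List String) → List (List String) → List (List String)
  | [], _, fins => fins
  | s :: ss, base, fins =>
      match aStep s base with
      | (base', none) => aLoop ss base' fins
      | (base', some r) => aLoop ss base' (fins ++ [r])

def datesort2 (stimes : List String) (specbase : List (List String)) (finsort : List (List String)) : List (List String) :=
  aLoop stimes specbase finsort

-- ===== PORT B =====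
-- queues.setdefault(row[0], []).append(row) over specbase
def bBuild (specbase : List (List String)) : PySem.Dict String (List (List String)) :=
  specbase.foldl (fun d row => d.insert (pvKey row) (d.getD (pvKey row) [] ++ [row])) PySem.Dict.empty

-- the stimes loop: q = queues.get(s, []); i = heads.get(s, 0); if i < len(q): take q[i], heads[s] = i+1
def bLoop (d : PySem.Dict String (List (List String))) : List String → PySem.Dict String Int → List (List String) → List (List String)
  | [], _, matched => matched
  | s :: ss, h, matched =>
      let q := d.getD s []
      let i := h.getD s 0
      if i < (q.length : Int) then
        bLoop d ss (h.insert s (i + 1)) (matched ++ [(PySem.List.pyGet? q i).getD []])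
      else
        bLoop d ss h matched

def datesort2_alt (stimes : List String) (specbase : List (List String)) (finsort : List (List String)) : List (List String) :=
  finsort ++ bLoop (bBuild specbase) stimes PySem.Dict.empty []

-- ===== PRECONDITION & SPEC =====
-- Pre_ excludes a specbase containing an empty row: there Python A's specbase[j][0] raises IndexError
-- (except when an earlier row already matched and broke the scan — see the cite), and B's grouping pass,
-- which reads row[0] of every row, always raises.
def Pre_datesort2 (stimes : List String) (specbase : List (List String)) (finsort : List (List String)) : Prop :=
  ∀ r ∈ specbase, r ≠ []
instance (stimes : List String) (specbase : List (List String)) (finsort : List (List String)) : Decidable (Pre_datesort2 stimes specbase finsort) := by unfold Pre_datesort2; infer_instance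

def pvWitness_datesort2 : List String × List (List String) × List (List String) :=
  (["2020", "2021"], [["2021", "b"], ["2020", "a"], ["2020", "c"]], [["hdr"]])

def Spec_datesort2 (stimes : List String) (specbase : List (List String)) (finsort : List (List String)) (out : List (List String)) : Prop := out = datesort2_alt stimes specbase finsort
instance (stimes : List String) (specbase : List (List String)) (finsort : List (List String)) (out : List (List String)) : Decidable (Spec_datesort2 stimes specbase finsort out) := by unfold Spec_datesort2; infer_instance

-- ===== CLAIM (what is proved, stated in full; the proofs are below) =====
def Claim_equal_datesort2 : Prop := ∀ (stimes : List String) (specbase : List (List String)) (finsort : List (List String)), Dom_datesort2 stimes specbase finsort → Pre_datesort2 stimes specbase finsort → Spec_datesort2 stimes specbase finsort (datesort2 stimes specbase finsort)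

-- ===== LEMMAS AND PROOFS =====

-- the rows of `base` whose date is k
def pvFilt (k : String) (base : List (List String)) : List (List String) :=
  base.filter (fun r => pvKey r == k)

lemma bBuild_getD (l : List (List String)) :
    ∀ (d : PySem.Dict String (List (List String))) (k : String),
      (l.foldl (fun d row => d.insert (pvKey row) (d.getD (pvKey row) [] ++ [row])) d).getD k []
        = d.getD k [] ++ pvFilt k l := by
  induction l with
  | nil => intro d k; simp [pvFilt]
  | cons r t ih =>
      intro d k
      simp only [List.foldl_cons, ih, pvFilt, List.filter_cons]
      by_cases hk : pvKey r = k
      · simp [hk]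
      · simp [PySem.Dict.getD_insert, hk, Ne.symm hk, beq_iff_eq]

lemma filt_cons (x : List String) (l : List (List String)) (k : String) :
    pvFilt k (x :: l) = if pvKey x = k then x :: pvFilt k l else pvFilt k l := by
  simp only [pvFilt, List.filter_cons]
  by_cases h : pvKey x = k
  · simp [h]
  · simp [h]

lemma aStep_spec (s : String) : ∀ base : List (List String),
    (pvFilt s base = [] → aStep s base = (base, none)) ∧
    (∀ r t, pvFilt s base = r :: t →
      ∃ base', aStep s base = (base', some r) ∧ pvFilt s base' = t ∧
        ∀ k, k ≠ s → pvFilt k base' = pvFilt k base) := by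
  intro base
  induction base with
  | nil => exact ⟨fun _ => rfl, fun r t h => by simp [pvFilt] at h⟩
  | cons x xs ih =>
      by_cases hx : pvKey x = s
      · constructor
        · intro h; rw [filt_cons, if_pos hx] at h; simp at h
        · intro r t h
          rw [filt_cons, if_pos hx] at h
          injection h with h1 h2
          subst h1
          refine ⟨xs, by simp [aStep, hx], h2, ?_⟩
          intro k hk
          rw [filt_cons, if_neg (fun hh => hk ((hx.symm.trans hh).symm))]
      · have hcond : (s == pvKey x) = false := by
          simp; exact fun hh => hx hh.symm
        have hstep : aStep s (x :: xs) = (x :: (aStep s xs).1, (aStep s xs).2) := by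
          simp [aStep, hcond]
        constructor
        · intro h
          rw [filt_cons, if_neg hx] at h
          simp [hstep, ih.1 h]
        · intro r t h
          rw [filt_cons, if_neg hx] at h
          obtain ⟨b', hb, hfs, hfk⟩ := ih.2 r t h
          refine ⟨x :: b', by rw [hstep, hb], ?_, ?_⟩
          · rw [filt_cons, if_neg hx]; exact hfs
          · intro k hk
            rw [filt_cons, filt_cons]
            by_cases hxk : pvKey x = k
            · rw [if_pos hxk, if_pos hxk, hfk k hk]
            · rw [if_neg hxk, if_neg hxk, hfk k hk]

lemma bLoop_acc (d : PySem.Dict String (List (List String))) :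
    ∀ (ss : List String) (h : PySem.Dict String Int) (a b : List (List String)),
      bLoop d ss h (a ++ b) = a ++ bLoop d ss h b := by
  intro ss
  induction ss with
  | nil => intro h a b; rfl
  | cons s t ih =>
      intro h a b
      simp only [bLoop]
      split
      · rw [List.append_assoc, ih]
      · exact ih h a b

-- loop invariant: the remaining rows of `base` with date k are the queue for k with its first n consumed entries dropped
lemma main_loop (d : PySem.Dict String (List (List String))) :
    ∀ (ss : List String) (base : List (List String)) (h : PySem.Dict String Int) (acc : List (List String)),
      (∀ k, ∃ n : ℕ, h.getD k 0 = (n : Int) ∧ pvFilt k base = (d.getD k []).drop n) →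
      aLoop ss base acc = bLoop d ss h acc := by
  intro ss
  induction ss with
  | nil => intro base h acc _; rfl
  | cons s t ih =>
      intro base h acc hinv
      obtain ⟨n, hn, hf⟩ := hinv s
      set q := d.getD s [] with hq
      by_cases hlt : n < q.length
      · -- a match: the first remaining row with date s is q[n]
        have hdrop : q.drop n = q[n] :: q.drop (n + 1) := List.drop_eq_getElem_cons hlt
        rw [hdrop] at hf
        obtain ⟨base', hb, hfs, hfk⟩ := (aStep_spec s base).2 q[n] (q.drop (n + 1)) hf
        have hA : aLoop (s :: t) base acc = aLoop t base' (acc ++ [q[n]]) := by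
          simp [aLoop, hb]
        have hB : bLoop d (s :: t) h acc
            = bLoop d t (h.insert s ((n : Int) + 1)) (acc ++ [q[n]]) := by
          simp only [bLoop, hn, ← hq]
          rw [if_pos (by exact_mod_cast hlt)]
          congr 2
          simp [hlt]
        rw [hA, hB]
        apply ih
        intro k
        by_cases hk : k = s
        · subst hk
          refine ⟨n + 1, ?_, ?_⟩
          · rw [PySem.Dict.getD_insert, if_pos rfl]; push_cast; ring
          · rw [hfs, ← hq]
        · obtain ⟨m, hm, hfm⟩ := hinv k
          exact ⟨m, by simp [PySem.Dict.getD_insert, hk, hm], by rw [hfk k hk, hfm]⟩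
      · -- no match: the queue for s is exhausted (or empty)
        have hempty : pvFilt s base = [] := by
          rw [hf, List.drop_eq_nil_of_le (by omega)]
        have hA : aLoop (s :: t) base acc = aLoop t base acc := by
          simp [aLoop, (aStep_spec s base).1 hempty]
        have hB : bLoop d (s :: t) h acc = bLoop d t h acc := by
          simp only [bLoop, hn, ← hq]
          rw [if_neg (by exact_mod_cast hlt)]
        rw [hA, hB]
        exact ih base h acc hinv

-- ===== VERDICT (by name: the statement is the Claim_ definition above) =====
theorem datesort2_spec : Claim_equal_datesort2 := by
  intro stimes specbase finsort _ _
  unfold Spec_datesort2 datesort2 datesort2_alt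
  rw [show (finsort : List (List String)) ++ bLoop (bBuild specbase) stimes PySem.Dict.empty []
        = bLoop (bBuild specbase) stimes PySem.Dict.empty (finsort ++ []) from (bLoop_acc _ _ _ _ _).symm,
      List.append_nil]
  apply main_loop
  intro k
  refine ⟨0, by simp [PySem.Dict.getD], ?_⟩
  have := bBuild_getD specbase PySem.Dict.empty k
  unfold bBuild
  rw [this]
  simp [PySem.Dict.getD]
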